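-- pv_equiv track=rewrite | github.com/DLR-RM/BlenderProc | blenderproc/python/utility/Utility.py | generate_equidistant_values
-- ===== SOURCE A (Python) =====
-- from typing import List, Dict, Any, Tuple, Optional, Union
--
-- def generate_equidistant_values(num: int, space_size_per_dimension: int) -> Tuple[List[List[int]], int]:
--     """ This function generates N equidistant values in a 3-dim space and returns num of them.
--
--     Every dimension of the space is limited by [0, K], where K is the given space_size_per_dimension.
--     Basically it splits a cube of shape K x K x K in to N smaller blocks. Where, N = cube_length^3
--     and cube_length is the smallest integer for which N >= num.
--
--     If K is not a multiple of N, then the sum of all blocks might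
--     not fill up the whole K ** 3 cube.
--
--     :param num: The total number of values required.
--     :param space_size_per_dimension: The side length of cube.
--     """
--     num_splits_per_dimension = 1
--     values = []
--     # find cube_length bound of cubes to be made
--     while num_splits_per_dimension ** 3 < num:
--         num_splits_per_dimension += 1
--
--     # Calc the side length of a block. We do a integer division here, s.t. we get blocks with the exact same size,
--     # even though we are then not using the full space of [0, 255] ** 3
--     block_length = space_size_per_dimension // num_splits_per_dimension
--
--     # Calculate the center of each block and use them as equidistant values
--     r_mid_point = block_length // 2
--     for r in range(num_splits_per_dimension):
--         g_mid_point = block_length // 2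
--         for g in range(num_splits_per_dimension):
--             b_mid_point = block_length // 2
--             for b in range(num_splits_per_dimension):
--                 values.append([r_mid_point, g_mid_point, b_mid_point])
--                 b_mid_point += block_length
--             g_mid_point += block_length
--         r_mid_point += block_length
--     return values[:num], num_splits_per_dimension
-- ===== SOURCE B (Python) =====
-- from typing import List, Tuple
--
-- def generate_equidistant_values(num: int, space_size_per_dimension: int) -> Tuple[List[List[int]], int]:
--     # find the smallest cube side n with n**3 >= num (exact, cheap)
--     n = 1
--     while n ** 3 < num:
--         n += 1
--     block_length = space_size_per_dimension // n
--     half = block_length // 2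
--     # generate only the num needed block centers directly by index arithmetic
--     # (r-major order: i = r*n*n + g*n + b)
--     values = [[half + (i // (n * n)) * block_length,
--                half + ((i // n) % n) * block_length,
--                half + (i % n) * block_length]
--               for i in range(num)]
--     return values, n
-- ===== Notes on version B (the rewrite author's own statement) =====
-- stated objective: alternative
-- what changed: The triple nested accumulator loop building all n^3 block centers plus a final slice is replaced by a single flat loop over range(num) that decodes each index i into (r,g,b) = (i//(n*n), (i//n)%n, i%n) and computes the center directly, generating only the num needed points.
import Mathlib
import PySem

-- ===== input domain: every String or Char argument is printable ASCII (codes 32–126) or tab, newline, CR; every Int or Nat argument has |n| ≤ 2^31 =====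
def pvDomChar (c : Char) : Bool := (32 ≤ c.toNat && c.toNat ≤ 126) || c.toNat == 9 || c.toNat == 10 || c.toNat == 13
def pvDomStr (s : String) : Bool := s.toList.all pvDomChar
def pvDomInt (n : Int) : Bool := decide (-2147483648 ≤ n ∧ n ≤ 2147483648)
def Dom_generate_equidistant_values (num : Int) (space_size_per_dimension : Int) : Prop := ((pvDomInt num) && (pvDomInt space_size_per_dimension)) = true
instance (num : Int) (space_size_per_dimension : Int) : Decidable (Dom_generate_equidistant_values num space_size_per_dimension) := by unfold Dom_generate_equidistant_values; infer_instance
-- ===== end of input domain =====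

-- B replaces A's triple nested accumulator loop plus final slice by a single flat loop over
-- range(num) that decodes each index into (r,g,b) by integer arithmetic (alternative decomposition).


-- ===== PORT A =====
-- while num_splits_per_dimension ** 3 < num: num_splits_per_dimension += 1
def pvFindSplits (num : Int) (n : Int) : Int :=
  if n ^ 3 < num then pvFindSplits num (n + 1) else n
termination_by (num - n ^ 3).toNat
decreasing_by
  have h1 : n ^ 3 < (n + 1) ^ 3 := by nlinarith [sq_nonneg (2 * n + 1)]
  omega

def generate_equidistant_values (num : Int) (space_size_per_dimension : Int) : List (List Int) × Int :=
  let n := pvFindSplits num 1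
  let block_length := PySem.Int.floordiv space_size_per_dimension n
  let outer :=
    (PySem.List.pyRange 0 n).foldl (fun (s : List (List Int) × Int) _ =>
      let mid :=
        (PySem.List.pyRange 0 n).foldl (fun (t : List (List Int) × Int) _ =>
          let inner :=
            (PySem.List.pyRange 0 n).foldl (fun (u : List (List Int) × Int) _ =>
              (u.1 ++ [[s.2, t.2, u.2]], u.2 + block_length))
              (t.1, PySem.Int.floordiv block_length 2)
          (inner.1, t.2 + block_length))
          (s.1, PySem.Int.floordiv block_length 2)
      (mid.1, s.2 + block_length))
      ([], PySem.Int.floordiv block_length 2)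
  (PySem.List.slice outer.1 none (some num), n)

-- ===== PORT B =====
-- same exact while loop as in Source B
def pvFindSplitsAlt (num : Int) (n : Int) : Int :=
  if n ^ 3 < num then pvFindSplitsAlt num (n + 1) else n
termination_by (num - n ^ 3).toNat
decreasing_by
  have h1 : n ^ 3 < (n + 1) ^ 3 := by nlinarith [sq_nonneg (2 * n + 1)]
  omega

def generate_equidistant_values_alt (num : Int) (space_size_per_dimension : Int) : List (List Int) × Int :=
  let n := pvFindSplitsAlt num 1
  let block_length := PySem.Int.floordiv space_size_per_dimension n
  let half := PySem.Int.floordiv block_length 2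
  ((PySem.List.pyRange 0 num).map (fun i =>
    [half + PySem.Int.floordiv i (n * n) * block_length,
     half + PySem.Int.mod (PySem.Int.floordiv i n) n * block_length,
     half + PySem.Int.mod i n * block_length]), n)

-- ===== PRECONDITION & SPEC =====
def Spec_generate_equidistant_values (num : Int) (space_size_per_dimension : Int) (out : List (List Int) × Int) : Prop := out = generate_equidistant_values_alt num space_size_per_dimension
instance (num : Int) (space_size_per_dimension : Int) (out : List (List Int) × Int) : Decidable (Spec_generate_equidistant_values num space_size_per_dimension out) := by unfold Spec_generate_equidistant_values; infer_instance

-- ===== CLAIM (what is proved, stated in full; the proofs are below) =====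
def Claim_equal_generate_equidistant_values : Prop := ∀ (num : Int) (space_size_per_dimension : Int), Dom_generate_equidistant_values num space_size_per_dimension → Spec_generate_equidistant_values num space_size_per_dimension (generate_equidistant_values num space_size_per_dimension)

-- ===== LEMMAS AND PROOFS =====

theorem findSplits_alt_eq (num n : Int) : pvFindSplitsAlt num n = pvFindSplits num n := by
  induction n using pvFindSplitsAlt.induct (num := num) with
  | case1 x h ih => rw [pvFindSplitsAlt, pvFindSplits, if_pos h, if_pos h]; exact ih
  | case2 x h => rw [pvFindSplitsAlt, pvFindSplits, if_neg h, if_neg h]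

theorem findSplits_ge (num n : Int) : n ≤ pvFindSplits num n ∧ ¬ (pvFindSplits num n) ^ 3 < num := by
  induction n using pvFindSplits.induct (num := num) with
  | case1 x h ih => rw [pvFindSplits, if_pos h]; exact ⟨by omega, ih.2⟩
  | case2 x h => rw [pvFindSplits, if_neg h]; exact ⟨le_refl x, h⟩


theorem foldl_inner {α : Type} (bl r g : Int) (l : List α) :
    ∀ (acc : List (List Int)) (m0 : Int),
    l.foldl (fun (u : List (List Int) × Int) _ => (u.1 ++ [[r, g, u.2]], u.2 + bl)) (acc, m0)
    = (acc ++ (List.range l.length).map (fun (k : Nat) => [r, g, m0 + (k : Int) * bl]), m0 + l.length * bl) := by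
  induction l with
  | nil => simp
  | cons a l ih =>
    intro acc m0
    rw [List.foldl_cons, ih]
    rw [List.length_cons, List.range_succ_eq_map, List.map_cons, List.map_map]
    refine Prod.ext ?_ ?_
    · simp only [List.append_assoc, List.singleton_append, Nat.cast_zero, zero_mul, add_zero]
      congr 1
      congr 1
      apply List.map_congr_left
      intro k _
      simp only [Function.comp_apply]
      push_cast
      ring_nf
    · simp only []
      push_cast
      ring

theorem foldl_mid (nI bl h r : Int) (l : List Int) :
    ∀ (acc : List (List Int)) (m0 : Int),
    l.foldl (fun (t : List (List Int) × Int) _ =>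
      (((PySem.List.pyRange 0 nI).foldl (fun (u : List (List Int) × Int) _ =>
          (u.1 ++ [[r, t.2, u.2]], u.2 + bl)) (t.1, h)).1, t.2 + bl)) (acc, m0)
    = (acc ++ (List.range l.length).flatMap (fun (kg : Nat) =>
         (List.range (PySem.List.pyRange 0 nI).length).map (fun (kb : Nat) =>
           [r, m0 + (kg : Int) * bl, h + (kb : Int) * bl])),
       m0 + l.length * bl) := by
  induction l with
  | nil => simp
  | cons a l ih =>
    intro acc m0
    rw [List.foldl_cons, foldl_inner, ih]
    rw [List.length_cons, List.range_succ_eq_map, List.flatMap_cons, List.flatMap_map]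
    refine Prod.ext ?_ ?_
    · show acc ++ _ ++ _ = acc ++ _
      rw [List.append_assoc]
      congr 1
      refine congrArg₂ (· ++ ·) ?_ ?_
      · apply List.map_congr_left; intro k _; push_cast; ring_nf
      · apply List.flatMap_congr; intro kg _; apply List.map_congr_left; intro kb _; push_cast; ring_nf
    · simp only []
      push_cast
      ring

theorem foldl_outer (nI bl h : Int) (l : List Int) :
    ∀ (acc : List (List Int)) (m0 : Int),
    l.foldl (fun (s : List (List Int) × Int) _ =>
      (((PySem.List.pyRange 0 nI).foldl (fun (t : List (List Int) × Int) _ =>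
          (((PySem.List.pyRange 0 nI).foldl (fun (u : List (List Int) × Int) _ =>
              (u.1 ++ [[s.2, t.2, u.2]], u.2 + bl)) (t.1, PySem.Int.floordiv bl 2)).1,
           t.2 + bl)) (s.1, h)).1, s.2 + bl)) (acc, m0)
    = (acc ++ (List.range l.length).flatMap (fun (kr : Nat) =>
         (List.range (PySem.List.pyRange 0 nI).length).flatMap (fun (kg : Nat) =>
           (List.range (PySem.List.pyRange 0 nI).length).map (fun (kb : Nat) =>
             [m0 + (kr : Int) * bl, h + (kg : Int) * bl, PySem.Int.floordiv bl 2 + (kb : Int) * bl]))),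
       m0 + l.length * bl) := by
  induction l with
  | nil => simp
  | cons a l ih =>
    intro acc m0
    rw [List.foldl_cons, foldl_mid, ih]
    rw [List.length_cons, List.range_succ_eq_map, List.flatMap_cons, List.flatMap_map]
    refine Prod.ext ?_ ?_
    · show acc ++ _ ++ _ = acc ++ _
      rw [List.append_assoc]
      congr 1
      refine congrArg₂ (· ++ ·) ?_ ?_
      · apply List.flatMap_congr; intro kg _; apply List.map_congr_left; intro kb _; push_cast; ring_nf
      · apply List.flatMap_congr; intro kr _; apply List.flatMap_congr; intro kg _
        apply List.map_congr_left; intro kb _; push_cast; ring_nf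
    · simp only []
      push_cast
      ring

theorem range_mul_map {α : Type} (b : Nat) (F : Nat → α) :
    ∀ (a : Nat), (List.range (a * b)).map F
      = (List.range a).flatMap (fun i => (List.range b).map (fun j => F (i * b + j))) := by
  intro a
  induction a with
  | zero => simp
  | succ a ih =>
    rw [Nat.succ_mul, List.range_add, List.map_append, ih, List.range_succ, List.flatMap_append]
    congr 1
    simp [List.map_map, Function.comp]

theorem cube_decode (nn : Nat) (h bl : Int) :
    (List.range (nn * nn * nn)).map (fun i =>
        [h + ((i / (nn * nn) : Nat) : Int) * bl,
         h + ((i / nn % nn : Nat) : Int) * bl,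
         h + ((i % nn : Nat) : Int) * bl])
    = (List.range nn).flatMap (fun (kr : Nat) =>
        (List.range nn).flatMap (fun (kg : Nat) =>
          (List.range nn).map (fun (kb : Nat) =>
            [h + (kr : Int) * bl, h + (kg : Int) * bl, h + (kb : Int) * bl]))) := by
  have hm : nn * nn * nn = nn * (nn * nn) := by ring
  rw [hm, range_mul_map]
  apply List.flatMap_congr
  intro kr hkr
  rw [range_mul_map]
  apply List.flatMap_congr
  intro kg hkg
  apply List.map_congr_left
  intro kb hkb
  rw [List.mem_range] at hkr hkg hkb
  have hnn : 0 < nn := by omega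
  have hlt : kg * nn + kb < nn * nn := by
    calc kg * nn + kb < kg * nn + nn := by omega
    _ = (kg + 1) * nn := by ring
    _ ≤ nn * nn := Nat.mul_le_mul_right nn (by omega)
  have hi : kr * (nn * nn) + (kg * nn + kb) = (kg * nn + kb) + kr * (nn * nn) := by ring
  have e1 : (kr * (nn * nn) + (kg * nn + kb)) / (nn * nn) = kr := by
    rw [hi, Nat.add_mul_div_right _ _ (by positivity), Nat.div_eq_of_lt hlt, Nat.zero_add]
  have hi2 : kr * (nn * nn) + (kg * nn + kb) = kb + (kg + kr * nn) * nn := by ring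
  have e2 : (kr * (nn * nn) + (kg * nn + kb)) / nn % nn = kg := by
    rw [hi2, Nat.add_mul_div_right _ _ hnn, Nat.div_eq_of_lt hkb, Nat.zero_add,
        Nat.add_mul_mod_self_right, Nat.mod_eq_of_lt hkg]
  have e3 : (kr * (nn * nn) + (kg * nn + kb)) % nn = kb := by
    rw [hi2, Nat.add_mul_mod_self_right, Nat.mod_eq_of_lt hkb]
  rw [e1, e2, e3]

theorem main_spec : ∀ (num sz : Int),
    generate_equidistant_values num sz = generate_equidistant_values_alt num sz := by
  intro num sz
  obtain ⟨hn1, hcube⟩ := findSplits_ge num 1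
  simp only [generate_equidistant_values, generate_equidistant_values_alt, findSplits_alt_eq]
  rw [foldl_outer]
  set n := pvFindSplits num 1 with hn
  set bl := PySem.Int.floordiv sz n with hbl
  set h := PySem.Int.floordiv bl 2 with hh
  simp only [List.nil_append]
  by_cases hpos : 0 < num
  · obtain ⟨nn, hnn⟩ : ∃ m : Nat, n = (m : Int) := ⟨n.toNat, by omega⟩
    rw [hnn, PySem.List.pyRange_zero_natCast]
    simp only [List.length_map, List.length_range]
    rw [← cube_decode nn h bl]
    obtain ⟨M, hM⟩ : ∃ m : Nat, num = (m : Int) := ⟨num.toNat, by omega⟩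
    rw [hM, PySem.List.pyRange_zero_natCast]
    simp only [List.map_map]
    rw [PySem.List.slice_to _ (by omega : (0:Int) ≤ (M : Int))]
    rw [Int.toNat_natCast, ← List.map_take, List.take_range]
    have hMN : M ≤ nn * nn * nn := by
      have h3 : num ≤ n ^ 3 := by omega
      rw [hM, hnn] at h3
      have : ((nn : Int)) ^ 3 = ((nn * nn * nn : Nat) : Int) := by push_cast; ring
      omega
    rw [min_eq_left hMN]
    refine congrArg₂ Prod.mk ?_ rfl
    apply List.map_congr_left
    intro i hi
    simp only [Function.comp_apply]
    rw [show ((nn : Int) * nn) = ((nn * nn : Nat) : Int) by push_cast; ring]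
    simp only [PySem.Int.floordiv_natCast, PySem.Int.mod_natCast]
  · have hne : n = 1 := by
      rw [hn, pvFindSplits, if_neg (by norm_num; omega : ¬ (1:Int) ^ 3 < num)]
    rw [hne]
    have hp1 : PySem.List.pyRange 0 (1:Int) = [0] := by decide
    simp only [hp1]
    have hBe : PySem.List.pyRange 0 num = [] := by
      simp [PySem.List.pyRange, show ¬(0:Int) < num by omega]
    simp only [hBe, List.map_nil]
    refine congrArg₂ Prod.mk ?_ rfl
    simp only [List.length_singleton, List.range_one, List.flatMap_cons, List.flatMap_nil,
      List.map_cons, List.map_nil, List.append_nil]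
    rcases eq_or_lt_of_le (not_lt.mp hpos) with hz | hneg
    · rw [hz, PySem.List.slice_to _ (by omega)]
      simp
    · obtain ⟨k, hk, hkpos⟩ : ∃ k : Nat, num = -(k : Int) ∧ 0 < k := ⟨(-num).toNat, by omega, by omega⟩
      rw [hk, PySem.List.slice_to_neg_natCast _ _ hkpos]
      simp [Nat.sub_eq_zero_of_le (by omega : 1 ≤ k)]

-- ===== VERDICT (by name: the statement is the Claim_ definition above) =====
theorem generate_equidistant_values_spec : Claim_equal_generate_equidistant_values := by
  intro num sz _
  unfold Spec_generate_equidistant_values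
  exact main_spec num sz
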